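-- pv_equiv track=rewrite | github.com/sriramdingari/Constellation | constellation/parsers/python_parser.py | _detect_class_stereotypes
-- ===== SOURCE A (Python) =====
-- PYDANTIC_BASES = frozenset({
--     "BaseModel", "pydantic.BaseModel",
-- })
--
-- DJANGO_MODEL_BASES = frozenset({
--     "Model", "models.Model", "django.db.models.Model",
-- })
--
-- ENUM_BASES = frozenset({
--     "Enum", "enum.Enum", "IntEnum", "enum.IntEnum",
--     "StrEnum", "enum.StrEnum", "Flag", "enum.Flag",
--     "IntFlag", "enum.IntFlag",
-- })
--
-- TEST_CLASS_BASES = frozenset({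
--     "TestCase", "unittest.TestCase", "django.test.TestCase",
-- })
--
-- def _detect_class_stereotypes(
--
--     class_name: str,
--     bases: list[str],
--     decorators: list[str],
-- ) -> list[str]:
--     """Detect stereotypes for a class based on name, bases, and decorators."""
--     stereotypes: list[str] = []
--
--     # Test class: name starts with "Test" or inherits TestCase
--     if class_name.startswith("Test"):
--         stereotypes.append("test")
--     else:
--         base_names = {b.split(".")[-1] for b in bases}
--         if base_names & TEST_CLASS_BASES:
--             stereotypes.append("test")
--
--     # Django model
--     if any(b in DJANGO_MODEL_BASES for b in bases):
--         stereotypes.append("django_model")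
--
--     # Pydantic model
--     if any(b in PYDANTIC_BASES for b in bases):
--         stereotypes.append("pydantic_model")
--
--     # Enum
--     if any(b in ENUM_BASES for b in bases):
--         stereotypes.append("enum")
--
--     return stereotypes
-- ===== SOURCE B (Python) =====
-- _BASE_TABLE = {
--     "Model": "django_model",
--     "models.Model": "django_model",
--     "django.db.models.Model": "django_model",
--     "BaseModel": "pydantic_model",
--     "pydantic.BaseModel": "pydantic_model",
--     "Enum": "enum",
--     "enum.Enum": "enum",
--     "IntEnum": "enum",
--     "enum.IntEnum": "enum",
--     "StrEnum": "enum",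
--     "enum.StrEnum": "enum",
--     "Flag": "enum",
--     "enum.Flag": "enum",
--     "IntFlag": "enum",
--     "enum.IntFlag": "enum",
-- }
--
-- _TEST_BASES = {"TestCase", "unittest.TestCase", "django.test.TestCase"}
--
-- _ORDER = ("test", "django_model", "pydantic_model", "enum")
--
--
-- def _detect_class_stereotypes(
--     class_name: str,
--     bases: list[str],
--     decorators: list[str],
-- ) -> list[str]:
--     """Single table-driven pass over the bases, then emit in canonical order."""
--     found = set()
--     if class_name.startswith("Test"):
--         found.add("test")
--     for b in bases:
--         cat = _BASE_TABLE.get(b)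
--         if cat is not None:
--             found.add(cat)
--         if b.split(".")[-1] in _TEST_BASES:
--             found.add("test")
--     return [s for s in _ORDER if s in found]
-- ===== Notes on version B (the rewrite author's own statement) =====
-- stated objective: alternative
-- what changed: A runs four independent scans over bases (plus a set comprehension for the test check) and appends as it goes; B makes one table-driven pass over bases with a base->stereotype lookup dict collecting a found-set, then emits the categories once in the canonical order.
import Mathlib
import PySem

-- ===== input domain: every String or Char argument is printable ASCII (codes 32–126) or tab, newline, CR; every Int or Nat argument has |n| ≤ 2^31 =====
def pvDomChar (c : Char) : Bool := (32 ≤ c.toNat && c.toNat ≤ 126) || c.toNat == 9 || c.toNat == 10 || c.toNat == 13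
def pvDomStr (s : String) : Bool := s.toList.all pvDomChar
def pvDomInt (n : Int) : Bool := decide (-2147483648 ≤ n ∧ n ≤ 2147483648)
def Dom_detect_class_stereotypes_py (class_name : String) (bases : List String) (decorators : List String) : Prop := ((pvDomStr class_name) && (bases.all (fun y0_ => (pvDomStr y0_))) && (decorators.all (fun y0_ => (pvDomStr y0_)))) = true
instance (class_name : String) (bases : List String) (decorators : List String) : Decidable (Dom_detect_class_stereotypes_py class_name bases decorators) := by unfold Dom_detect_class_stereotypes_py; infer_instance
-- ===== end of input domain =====

set_option maxHeartbeats 1000000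


-- B replaces A's four independent scans of `bases` by a single table-driven pass
-- collecting a found-set, emitting the categories once in the canonical order (objective: alternative decomposition).

-- ===== PORT A =====
def pvPYDANTIC_BASES : PySem.Set String :=
  PySem.Set.ofList ["BaseModel", "pydantic.BaseModel"]
def pvDJANGO_MODEL_BASES : PySem.Set String :=
  PySem.Set.ofList ["Model", "models.Model", "django.db.models.Model"]
def pvENUM_BASES : PySem.Set String :=
  PySem.Set.ofList ["Enum", "enum.Enum", "IntEnum", "enum.IntEnum",
    "StrEnum", "enum.StrEnum", "Flag", "enum.Flag", "IntFlag", "enum.IntFlag"]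
def pvTEST_CLASS_BASES : PySem.Set String :=
  PySem.Set.ofList ["TestCase", "unittest.TestCase", "django.test.TestCase"]

-- b.split(".")[-1]; exact: split? is none only for sep = "", and the split list is never []
def pvLastComp (b : String) : String :=
  PySem.List.pyGetD ((PySem.Str.split? b ".").getD []) (-1) ""

def detect_class_stereotypes_py (class_name : String) (bases : List String) (decorators : List String) : List String :=
  let stereotypes : List String := []
  let stereotypes :=
    if PySem.Str.startswith class_name "Test" then stereotypes ++ ["test"]
    else
      let base_names : PySem.Set String := PySem.Set.ofList (bases.map pvLastComp)
      if PySem.Set.inter base_names pvTEST_CLASS_BASES ≠ [] then stereotypes ++ ["test"]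
      else stereotypes
  let stereotypes :=
    if bases.any (fun b => PySem.Set.contains pvDJANGO_MODEL_BASES b) then stereotypes ++ ["django_model"] else stereotypes
  let stereotypes :=
    if bases.any (fun b => PySem.Set.contains pvPYDANTIC_BASES b) then stereotypes ++ ["pydantic_model"] else stereotypes
  let stereotypes :=
    if bases.any (fun b => PySem.Set.contains pvENUM_BASES b) then stereotypes ++ ["enum"] else stereotypes
  stereotypes

-- ===== PORT B =====
def pvBaseTable : PySem.Dict String String := PySem.Dict.mk
  [("Model", "django_model"), ("models.Model", "django_model"), ("django.db.models.Model", "django_model"),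
   ("BaseModel", "pydantic_model"), ("pydantic.BaseModel", "pydantic_model"),
   ("Enum", "enum"), ("enum.Enum", "enum"), ("IntEnum", "enum"), ("enum.IntEnum", "enum"),
   ("StrEnum", "enum"), ("enum.StrEnum", "enum"), ("Flag", "enum"), ("enum.Flag", "enum"),
   ("IntFlag", "enum"), ("enum.IntFlag", "enum")]

def pvOrder : List String := ["test", "django_model", "pydantic_model", "enum"]

-- body of Source B's single loop over `bases`
def pvStep (found : PySem.Set String) (b : String) : PySem.Set String :=
  let found :=
    match PySem.Dict.get? pvBaseTable b with
    | some cat => PySem.Set.add found cat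
    | none => found
  if PySem.Set.contains pvTEST_CLASS_BASES (pvLastComp b) then PySem.Set.add found "test" else found

def detect_class_stereotypes_py_alt (class_name : String) (bases : List String) (decorators : List String) : List String :=
  let found : PySem.Set String :=
    if PySem.Str.startswith class_name "Test" then PySem.Set.add PySem.Set.empty "test"
    else PySem.Set.empty
  let found := bases.foldl pvStep found
  pvOrder.filter (fun s => PySem.Set.contains found s)

-- ===== PRECONDITION & SPEC =====
def Spec_detect_class_stereotypes_py (class_name : String) (bases : List String) (decorators : List String) (out : List String) : Prop := out = detect_class_stereotypes_py_alt class_name bases decorators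
instance (class_name : String) (bases : List String) (decorators : List String) (out : List String) : Decidable (Spec_detect_class_stereotypes_py class_name bases decorators out) := by unfold Spec_detect_class_stereotypes_py; infer_instance

-- ===== CLAIM (what is proved, stated in full; the proofs are below) =====
def Claim_equal_detect_class_stereotypes_py : Prop := ∀ (class_name : String) (bases : List String) (decorators : List String), Dom_detect_class_stereotypes_py class_name bases decorators → Spec_detect_class_stereotypes_py class_name bases decorators (detect_class_stereotypes_py class_name bases decorators)

-- ===== LEMMAS AND PROOFS =====
def pvHit (y b : String) : Bool :=
  (PySem.Dict.get? pvBaseTable b == some y) || (y == "test" && PySem.Set.contains pvTEST_CLASS_BASES (pvLastComp b))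

-- proof helper: the table lookup written as an if-chain
def pvLookup (b : String) : Option String :=
  if ("Model" : String) == b then some "django_model" else
  if ("models.Model" : String) == b then some "django_model" else
  if ("django.db.models.Model" : String) == b then some "django_model" else
  if ("BaseModel" : String) == b then some "pydantic_model" else
  if ("pydantic.BaseModel" : String) == b then some "pydantic_model" else
  if ("Enum" : String) == b then some "enum" else
  if ("enum.Enum" : String) == b then some "enum" else
  if ("IntEnum" : String) == b then some "enum" else
  if ("enum.IntEnum" : String) == b then some "enum" else
  if ("StrEnum" : String) == b then some "enum" else
  if ("enum.StrEnum" : String) == b then some "enum" else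
  if ("Flag" : String) == b then some "enum" else
  if ("enum.Flag" : String) == b then some "enum" else
  if ("IntFlag" : String) == b then some "enum" else
  if ("enum.IntFlag" : String) == b then some "enum" else
  none

theorem get?_table (b : String) : PySem.Dict.get? pvBaseTable b = pvLookup b := by
  simp only [pvBaseTable, PySem.Dict.get?_mk_cons, pvLookup]
  by_cases h0 : (("Model" : String) == b) = true
  · replace h0 := eq_of_beq h0; subst h0; rfl
  simp only [if_neg h0]
  by_cases h1 : (("models.Model" : String) == b) = true
  · replace h1 := eq_of_beq h1; subst h1; rfl
  simp only [if_neg h1]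
  by_cases h2 : (("django.db.models.Model" : String) == b) = true
  · replace h2 := eq_of_beq h2; subst h2; rfl
  simp only [if_neg h2]
  by_cases h3 : (("BaseModel" : String) == b) = true
  · replace h3 := eq_of_beq h3; subst h3; rfl
  simp only [if_neg h3]
  by_cases h4 : (("pydantic.BaseModel" : String) == b) = true
  · replace h4 := eq_of_beq h4; subst h4; rfl
  simp only [if_neg h4]
  by_cases h5 : (("Enum" : String) == b) = true
  · replace h5 := eq_of_beq h5; subst h5; rfl
  simp only [if_neg h5]
  by_cases h6 : (("enum.Enum" : String) == b) = true
  · replace h6 := eq_of_beq h6; subst h6; rfl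
  simp only [if_neg h6]
  by_cases h7 : (("IntEnum" : String) == b) = true
  · replace h7 := eq_of_beq h7; subst h7; rfl
  simp only [if_neg h7]
  by_cases h8 : (("enum.IntEnum" : String) == b) = true
  · replace h8 := eq_of_beq h8; subst h8; rfl
  simp only [if_neg h8]
  by_cases h9 : (("StrEnum" : String) == b) = true
  · replace h9 := eq_of_beq h9; subst h9; rfl
  simp only [if_neg h9]
  by_cases h10 : (("enum.StrEnum" : String) == b) = true
  · replace h10 := eq_of_beq h10; subst h10; rfl
  simp only [if_neg h10]
  by_cases h11 : (("Flag" : String) == b) = true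
  · replace h11 := eq_of_beq h11; subst h11; rfl
  simp only [if_neg h11]
  by_cases h12 : (("enum.Flag" : String) == b) = true
  · replace h12 := eq_of_beq h12; subst h12; rfl
  simp only [if_neg h12]
  by_cases h13 : (("IntFlag" : String) == b) = true
  · replace h13 := eq_of_beq h13; subst h13; rfl
  simp only [if_neg h13]
  by_cases h14 : (("enum.IntFlag" : String) == b) = true
  · replace h14 := eq_of_beq h14; subst h14; rfl
  simp only [if_neg h14]
  rfl
theorem hit_dj (b : String) : pvHit "django_model" b = PySem.Set.contains pvDJANGO_MODEL_BASES b := by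
  simp only [pvHit, get?_table, pvLookup]
  by_cases h0 : (("Model" : String) == b) = true
  · replace h0 := eq_of_beq h0; subst h0; decide
  simp only [if_neg h0]
  by_cases h1 : (("models.Model" : String) == b) = true
  · replace h1 := eq_of_beq h1; subst h1; decide
  simp only [if_neg h1]
  by_cases h2 : (("django.db.models.Model" : String) == b) = true
  · replace h2 := eq_of_beq h2; subst h2; decide
  simp only [if_neg h2]
  by_cases h3 : (("BaseModel" : String) == b) = true
  · replace h3 := eq_of_beq h3; subst h3; decide
  simp only [if_neg h3]
  by_cases h4 : (("pydantic.BaseModel" : String) == b) = true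
  · replace h4 := eq_of_beq h4; subst h4; decide
  simp only [if_neg h4]
  by_cases h5 : (("Enum" : String) == b) = true
  · replace h5 := eq_of_beq h5; subst h5; decide
  simp only [if_neg h5]
  by_cases h6 : (("enum.Enum" : String) == b) = true
  · replace h6 := eq_of_beq h6; subst h6; decide
  simp only [if_neg h6]
  by_cases h7 : (("IntEnum" : String) == b) = true
  · replace h7 := eq_of_beq h7; subst h7; decide
  simp only [if_neg h7]
  by_cases h8 : (("enum.IntEnum" : String) == b) = true
  · replace h8 := eq_of_beq h8; subst h8; decide
  simp only [if_neg h8]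
  by_cases h9 : (("StrEnum" : String) == b) = true
  · replace h9 := eq_of_beq h9; subst h9; decide
  simp only [if_neg h9]
  by_cases h10 : (("enum.StrEnum" : String) == b) = true
  · replace h10 := eq_of_beq h10; subst h10; decide
  simp only [if_neg h10]
  by_cases h11 : (("Flag" : String) == b) = true
  · replace h11 := eq_of_beq h11; subst h11; decide
  simp only [if_neg h11]
  by_cases h12 : (("enum.Flag" : String) == b) = true
  · replace h12 := eq_of_beq h12; subst h12; decide
  simp only [if_neg h12]
  by_cases h13 : (("IntFlag" : String) == b) = true
  · replace h13 := eq_of_beq h13; subst h13; decide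
  simp only [if_neg h13]
  by_cases h14 : (("enum.IntFlag" : String) == b) = true
  · replace h14 := eq_of_beq h14; subst h14; decide
  simp only [if_neg h14]
  simp [pvDJANGO_MODEL_BASES, PySem.Set.contains]
  exact ⟨fun h => h0 (beq_iff_eq.mpr h.symm), fun h => h1 (beq_iff_eq.mpr h.symm), fun h => h2 (beq_iff_eq.mpr h.symm)⟩

theorem hit_py (b : String) : pvHit "pydantic_model" b = PySem.Set.contains pvPYDANTIC_BASES b := by
  simp only [pvHit, get?_table, pvLookup]
  by_cases h0 : (("Model" : String) == b) = true
  · replace h0 := eq_of_beq h0; subst h0; decide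
  simp only [if_neg h0]
  by_cases h1 : (("models.Model" : String) == b) = true
  · replace h1 := eq_of_beq h1; subst h1; decide
  simp only [if_neg h1]
  by_cases h2 : (("django.db.models.Model" : String) == b) = true
  · replace h2 := eq_of_beq h2; subst h2; decide
  simp only [if_neg h2]
  by_cases h3 : (("BaseModel" : String) == b) = true
  · replace h3 := eq_of_beq h3; subst h3; decide
  simp only [if_neg h3]
  by_cases h4 : (("pydantic.BaseModel" : String) == b) = true
  · replace h4 := eq_of_beq h4; subst h4; decide
  simp only [if_neg h4]
  by_cases h5 : (("Enum" : String) == b) = true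
  · replace h5 := eq_of_beq h5; subst h5; decide
  simp only [if_neg h5]
  by_cases h6 : (("enum.Enum" : String) == b) = true
  · replace h6 := eq_of_beq h6; subst h6; decide
  simp only [if_neg h6]
  by_cases h7 : (("IntEnum" : String) == b) = true
  · replace h7 := eq_of_beq h7; subst h7; decide
  simp only [if_neg h7]
  by_cases h8 : (("enum.IntEnum" : String) == b) = true
  · replace h8 := eq_of_beq h8; subst h8; decide
  simp only [if_neg h8]
  by_cases h9 : (("StrEnum" : String) == b) = true
  · replace h9 := eq_of_beq h9; subst h9; decide
  simp only [if_neg h9]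
  by_cases h10 : (("enum.StrEnum" : String) == b) = true
  · replace h10 := eq_of_beq h10; subst h10; decide
  simp only [if_neg h10]
  by_cases h11 : (("Flag" : String) == b) = true
  · replace h11 := eq_of_beq h11; subst h11; decide
  simp only [if_neg h11]
  by_cases h12 : (("enum.Flag" : String) == b) = true
  · replace h12 := eq_of_beq h12; subst h12; decide
  simp only [if_neg h12]
  by_cases h13 : (("IntFlag" : String) == b) = true
  · replace h13 := eq_of_beq h13; subst h13; decide
  simp only [if_neg h13]
  by_cases h14 : (("enum.IntFlag" : String) == b) = true
  · replace h14 := eq_of_beq h14; subst h14; decide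
  simp only [if_neg h14]
  simp [pvPYDANTIC_BASES, PySem.Set.contains]
  exact ⟨fun h => h3 (beq_iff_eq.mpr h.symm), fun h => h4 (beq_iff_eq.mpr h.symm)⟩

theorem hit_en (b : String) : pvHit "enum" b = PySem.Set.contains pvENUM_BASES b := by
  simp only [pvHit, get?_table, pvLookup]
  by_cases h0 : (("Model" : String) == b) = true
  · replace h0 := eq_of_beq h0; subst h0; decide
  simp only [if_neg h0]
  by_cases h1 : (("models.Model" : String) == b) = true
  · replace h1 := eq_of_beq h1; subst h1; decide
  simp only [if_neg h1]
  by_cases h2 : (("django.db.models.Model" : String) == b) = true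
  · replace h2 := eq_of_beq h2; subst h2; decide
  simp only [if_neg h2]
  by_cases h3 : (("BaseModel" : String) == b) = true
  · replace h3 := eq_of_beq h3; subst h3; decide
  simp only [if_neg h3]
  by_cases h4 : (("pydantic.BaseModel" : String) == b) = true
  · replace h4 := eq_of_beq h4; subst h4; decide
  simp only [if_neg h4]
  by_cases h5 : (("Enum" : String) == b) = true
  · replace h5 := eq_of_beq h5; subst h5; decide
  simp only [if_neg h5]
  by_cases h6 : (("enum.Enum" : String) == b) = true
  · replace h6 := eq_of_beq h6; subst h6; decide
  simp only [if_neg h6]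
  by_cases h7 : (("IntEnum" : String) == b) = true
  · replace h7 := eq_of_beq h7; subst h7; decide
  simp only [if_neg h7]
  by_cases h8 : (("enum.IntEnum" : String) == b) = true
  · replace h8 := eq_of_beq h8; subst h8; decide
  simp only [if_neg h8]
  by_cases h9 : (("StrEnum" : String) == b) = true
  · replace h9 := eq_of_beq h9; subst h9; decide
  simp only [if_neg h9]
  by_cases h10 : (("enum.StrEnum" : String) == b) = true
  · replace h10 := eq_of_beq h10; subst h10; decide
  simp only [if_neg h10]
  by_cases h11 : (("Flag" : String) == b) = true
  · replace h11 := eq_of_beq h11; subst h11; decide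
  simp only [if_neg h11]
  by_cases h12 : (("enum.Flag" : String) == b) = true
  · replace h12 := eq_of_beq h12; subst h12; decide
  simp only [if_neg h12]
  by_cases h13 : (("IntFlag" : String) == b) = true
  · replace h13 := eq_of_beq h13; subst h13; decide
  simp only [if_neg h13]
  by_cases h14 : (("enum.IntFlag" : String) == b) = true
  · replace h14 := eq_of_beq h14; subst h14; decide
  simp only [if_neg h14]
  simp [pvENUM_BASES, PySem.Set.contains]
  exact ⟨fun h => h5 (beq_iff_eq.mpr h.symm), fun h => h6 (beq_iff_eq.mpr h.symm), fun h => h7 (beq_iff_eq.mpr h.symm), fun h => h8 (beq_iff_eq.mpr h.symm), fun h => h9 (beq_iff_eq.mpr h.symm), fun h => h10 (beq_iff_eq.mpr h.symm), fun h => h11 (beq_iff_eq.mpr h.symm), fun h => h12 (beq_iff_eq.mpr h.symm), fun h => h13 (beq_iff_eq.mpr h.symm), fun h => h14 (beq_iff_eq.mpr h.symm)⟩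

theorem hit_test (b : String) : pvHit "test" b = PySem.Set.contains pvTEST_CLASS_BASES (pvLastComp b) := by
  simp only [pvHit, get?_table, pvLookup]
  by_cases h0 : (("Model" : String) == b) = true
  · replace h0 := eq_of_beq h0; subst h0; decide
  simp only [if_neg h0]
  by_cases h1 : (("models.Model" : String) == b) = true
  · replace h1 := eq_of_beq h1; subst h1; decide
  simp only [if_neg h1]
  by_cases h2 : (("django.db.models.Model" : String) == b) = true
  · replace h2 := eq_of_beq h2; subst h2; decide
  simp only [if_neg h2]
  by_cases h3 : (("BaseModel" : String) == b) = true
  · replace h3 := eq_of_beq h3; subst h3; decide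
  simp only [if_neg h3]
  by_cases h4 : (("pydantic.BaseModel" : String) == b) = true
  · replace h4 := eq_of_beq h4; subst h4; decide
  simp only [if_neg h4]
  by_cases h5 : (("Enum" : String) == b) = true
  · replace h5 := eq_of_beq h5; subst h5; decide
  simp only [if_neg h5]
  by_cases h6 : (("enum.Enum" : String) == b) = true
  · replace h6 := eq_of_beq h6; subst h6; decide
  simp only [if_neg h6]
  by_cases h7 : (("IntEnum" : String) == b) = true
  · replace h7 := eq_of_beq h7; subst h7; decide
  simp only [if_neg h7]
  by_cases h8 : (("enum.IntEnum" : String) == b) = true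
  · replace h8 := eq_of_beq h8; subst h8; decide
  simp only [if_neg h8]
  by_cases h9 : (("StrEnum" : String) == b) = true
  · replace h9 := eq_of_beq h9; subst h9; decide
  simp only [if_neg h9]
  by_cases h10 : (("enum.StrEnum" : String) == b) = true
  · replace h10 := eq_of_beq h10; subst h10; decide
  simp only [if_neg h10]
  by_cases h11 : (("Flag" : String) == b) = true
  · replace h11 := eq_of_beq h11; subst h11; decide
  simp only [if_neg h11]
  by_cases h12 : (("enum.Flag" : String) == b) = true
  · replace h12 := eq_of_beq h12; subst h12; decide
  simp only [if_neg h12]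
  by_cases h13 : (("IntFlag" : String) == b) = true
  · replace h13 := eq_of_beq h13; subst h13; decide
  simp only [if_neg h13]
  by_cases h14 : (("enum.IntFlag" : String) == b) = true
  · replace h14 := eq_of_beq h14; subst h14; decide
  simp only [if_neg h14]
  simp [pvTEST_CLASS_BASES, PySem.Set.contains]

theorem mem_pvStep (f : PySem.Set String) (b y : String) :
    y ∈ pvStep f b ↔ y ∈ f ∨ pvHit y b = true := by
  unfold pvStep pvHit
  cases h : PySem.Dict.get? pvBaseTable b <;>
    split_ifs <;>
      simp_all [PySem.Set.mem_add, eq_comm (a := y)] <;> tauto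

theorem mem_foldl_pvStep (bases : List String) : ∀ (f : PySem.Set String) (y : String),
    y ∈ List.foldl pvStep f bases ↔ y ∈ f ∨ ∃ b ∈ bases, pvHit y b = true := by
  induction bases with
  | nil => simp
  | cons b bs ih =>
    intro f y
    simp [List.foldl_cons, ih, mem_pvStep, or_assoc]
def pvCanon (t d p e : Bool) : List String :=
  (if t then ["test"] else []) ++ (if d then ["django_model"] else []) ++
  (if p then ["pydantic_model"] else []) ++ (if e then ["enum"] else [])

theorem contains_found (f0 : PySem.Set String) (bases : List String) (y : String) :
    PySem.Set.contains (List.foldl pvStep f0 bases) y =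
      (PySem.Set.contains f0 y || bases.any (pvHit y)) := by
  rw [Bool.eq_iff_iff]
  simp [PySem.Set.contains_iff, mem_foldl_pvStep, List.any_eq_true]

theorem interA (bases : List String) :
    (PySem.Set.inter (PySem.Set.ofList (bases.map pvLastComp)) pvTEST_CLASS_BASES ≠ []) ↔
      (bases.any (fun b => PySem.Set.contains pvTEST_CLASS_BASES (pvLastComp b)) = true) := by
  rw [Ne, List.eq_nil_iff_forall_not_mem]
  push_neg
  simp [PySem.Set.mem_inter, PySem.Set.mem_ofList, List.any_eq_true, PySem.Set.contains_iff]

theorem app_if {α : Type} (c : Prop) [Decidable c] (l : List α) (x : α) :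
    (if c then l ++ [x] else l) = l ++ (if c then [x] else []) := by
  split_ifs <;> simp

theorem A_eq (cn : String) (bases decs : List String) :
    detect_class_stereotypes_py cn bases decs =
      pvCanon (PySem.Str.startswith cn "Test" || bases.any (fun b => PySem.Set.contains pvTEST_CLASS_BASES (pvLastComp b)))
              (bases.any (fun b => PySem.Set.contains pvDJANGO_MODEL_BASES b))
              (bases.any (fun b => PySem.Set.contains pvPYDANTIC_BASES b))
              (bases.any (fun b => PySem.Set.contains pvENUM_BASES b)) := by
  simp only [detect_class_stereotypes_py, pvCanon]
  rw [app_if, app_if, app_if]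
  simp only [List.append_assoc]
  congr 1
  by_cases hs : PySem.Str.startswith cn "Test" = true
  · have hs' : PySem.Chars.startswith cn.toList ['T', 'e', 's', 't'] = true := by simpa using hs
    simp [hs']
  · have hs' : PySem.Chars.startswith cn.toList ['T', 'e', 's', 't'] = false := by
      simpa [Bool.not_eq_true] using hs
    by_cases hI : PySem.Set.inter (PySem.Set.ofList (List.map pvLastComp bases)) pvTEST_CLASS_BASES = []
    · have ht : ¬ bases.any (fun b => PySem.Set.contains pvTEST_CLASS_BASES (pvLastComp b)) = true :=
        fun h => ((interA bases).mpr h) hI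
      simp only [List.any_eq_true, PySem.Set.contains_iff] at ht
      push_neg at ht
      simp [hs', hI]
      exact ht
    · have ht := (interA bases).mp hI
      simp only [List.any_eq_true, PySem.Set.contains_iff] at ht
      obtain ⟨x, hx, hx2⟩ := ht
      have hany : bases.any (fun b => PySem.Set.contains pvTEST_CLASS_BASES (pvLastComp b)) = true := by
        simp only [List.any_eq_true, PySem.Set.contains_iff]
        exact ⟨x, hx, hx2⟩
      simp [hs', hI, hany]
      exact ⟨x, hx, hx2⟩


theorem filter4 (p : String → Bool) (a b c d : String) :
    List.filter p [a, b, c, d] =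
      (if p a then [a] else []) ++ ((if p b then [b] else []) ++
        ((if p c then [c] else []) ++ (if p d then [d] else []))) := by
  simp only [List.filter_cons, List.filter_nil]
  cases ha : p a <;> cases hb : p b <;> cases hc : p c <;> cases hd : p d <;> simp

theorem B_eq (cn : String) (bases decs : List String) :
    detect_class_stereotypes_py_alt cn bases decs =
      pvCanon (PySem.Str.startswith cn "Test" || bases.any (fun b => PySem.Set.contains pvTEST_CLASS_BASES (pvLastComp b)))
              (bases.any (fun b => PySem.Set.contains pvDJANGO_MODEL_BASES b))
              (bases.any (fun b => PySem.Set.contains pvPYDANTIC_BASES b))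
              (bases.any (fun b => PySem.Set.contains pvENUM_BASES b)) := by
  simp only [detect_class_stereotypes_py_alt, pvOrder, pvCanon]
  rw [filter4]
  simp only [contains_found, funext hit_test, funext hit_dj, funext hit_py, funext hit_en,
    List.append_assoc]
  by_cases hs : PySem.Str.startswith cn "Test" = true
  · simp only [if_pos hs, hs]
    simp [PySem.Set.contains, PySem.Set.add, PySem.Set.empty]
  · have hs' : PySem.Chars.startswith cn.toList ['T', 'e', 's', 't'] = false := by
      simpa [Bool.not_eq_true] using hs
    simp only [if_neg hs]
    simp [hs', PySem.Set.contains, PySem.Set.empty]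

-- ===== VERDICT (by name: the statement is the Claim_ definition above) =====
theorem detect_class_stereotypes_py_spec : Claim_equal_detect_class_stereotypes_py := by
  intro cn bases decs _
  unfold Spec_detect_class_stereotypes_py
  rw [A_eq, B_eq]
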